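-- pv_equiv track=rewrite | github.com/Vinutha-Ananthachandran/sequence-allignment-dp-d-c | efficient_3.py | fwdPass
-- ===== SOURCE A (Python) =====
-- def fwdPass(str1,str2,alpha,delta):
--     n = len(str1)
--     m = len(str2)
--     opt = []
--     for i in range(n+1):
--         opt.append([0]*(m+1))
--     for j in range(m+1):
--         opt[0][j] = delta*j
--     for i in range(1, n+1):
--         opt[i][0] = opt[i-1][0]+delta
--         for j in range(1, m+1):
--             key=str1[i-1]+str2[j-1]
--             opt[i][j]=min(opt[i-1][j]+delta, opt[i-1][j-1]+alpha[key], opt[i][j-1]+delta)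
--         opt[i-1]=[]
--     return opt[n]
-- ===== SOURCE B (Python) =====
-- def fwdPass(str1, str2, alpha, delta):
--     # Top-down memoized recursion instead of a bottom-up table: cost(i, j) is
--     # the optimal alignment cost of str1[:i] vs str2[:j], cached in a dict.
--     # The final row is read off as [cost(n, j) for j in range(m + 1)].
--     n, m = len(str1), len(str2)
--     memo = {}
--
--     def cost(i, j):
--         got = memo.get((i, j))
--         if got is not None:
--             return got
--         if i == 0:
--             v = delta * j
--         elif j == 0:
--             v = delta * i
--         else:
--             v = min(cost(i - 1, j) + delta,
--                     cost(i - 1, j - 1) + alpha[str1[i - 1] + str2[j - 1]],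
--                     cost(i, j - 1) + delta)
--         memo[(i, j)] = v
--         return v
--
--     return [cost(n, j) for j in range(m + 1)]
-- ===== Notes on version B (the rewrite author's own statement) =====
-- stated objective: alternative
-- what changed: B replaces A's bottom-up iterative fill of a preallocated 2D table with a top-down recursive cost(i,j) function memoized in a dict keyed by (i,j), reading the final row off as [cost(n,j) for j in range(m+1)].
import Mathlib
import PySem

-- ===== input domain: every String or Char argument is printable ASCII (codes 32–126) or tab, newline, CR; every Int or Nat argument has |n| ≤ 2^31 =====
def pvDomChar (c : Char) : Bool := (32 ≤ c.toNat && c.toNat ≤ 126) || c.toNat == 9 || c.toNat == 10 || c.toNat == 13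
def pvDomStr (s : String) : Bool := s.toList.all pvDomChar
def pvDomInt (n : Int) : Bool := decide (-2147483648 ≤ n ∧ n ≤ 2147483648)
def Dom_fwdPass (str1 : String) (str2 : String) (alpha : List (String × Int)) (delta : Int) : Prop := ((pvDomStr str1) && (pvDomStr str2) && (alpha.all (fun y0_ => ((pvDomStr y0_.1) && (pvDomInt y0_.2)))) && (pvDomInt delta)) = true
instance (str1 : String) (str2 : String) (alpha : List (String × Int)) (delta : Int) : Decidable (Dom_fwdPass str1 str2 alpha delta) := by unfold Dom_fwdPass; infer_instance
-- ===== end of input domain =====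

-- B replaces A's bottom-up 2D table with a top-down memoized recursion cost(i,j)
-- cached in a dict, reading off the final row (objective: alternative).


-- Python's `alpha[key]` on the association list (first match; default irrelevant under Pre_).
def pvLook (alpha : List (String × Int)) (key : String) : Int :=
  (((alpha.find? (fun p => p.1 == key)).map Prod.snd).getD 0)

-- ===== PORT A =====
def fwdPass (str1 : String) (str2 : String) (alpha : List (String × Int)) (delta : Int) : List Int :=
  let s1 := str1.toList
  let s2 := str2.toList
  let n := s1.length
  let m := s2.length
  -- opt = []; for i in range(n+1): opt.append([0]*(m+1))
  let opt0 : List (List Int) :=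
    (PySem.List.pyRange 0 ((n : Int) + 1) 1).foldl
      (fun o _ => o ++ [List.replicate (m + 1) (0 : Int)]) []
  -- for j in range(m+1): opt[0][j] = delta*j
  let opt1 :=
    (PySem.List.pyRange 0 ((m : Int) + 1) 1).foldl
      (fun o j =>
        PySem.List.pySetD o 0 (PySem.List.pySetD (PySem.List.pyGetD o 0 []) j (delta * j))) opt0
  -- main double loop, with opt[i-1] = [] at the end of each outer iteration
  let opt2 :=
    (PySem.List.pyRange 1 ((n : Int) + 1) 1).foldl
      (fun o i =>
        let o := PySem.List.pySetD o i
          (PySem.List.pySetD (PySem.List.pyGetD o i []) 0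
            (PySem.List.pyGetD (PySem.List.pyGetD o (i - 1) []) 0 0 + delta))
        let o := (PySem.List.pyRange 1 ((m : Int) + 1) 1).foldl
          (fun o j =>
            let key := String.ofList [PySem.List.pyGetD s1 (i - 1) ' ', PySem.List.pyGetD s2 (j - 1) ' ']
            let v := min (min (PySem.List.pyGetD (PySem.List.pyGetD o (i - 1) []) j 0 + delta)
                              (PySem.List.pyGetD (PySem.List.pyGetD o (i - 1) []) (j - 1) 0 + pvLook alpha key))
                         (PySem.List.pyGetD (PySem.List.pyGetD o i []) (j - 1) 0 + delta)
            PySem.List.pySetD o i (PySem.List.pySetD (PySem.List.pyGetD o i []) j v)) o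
        PySem.List.pySetD o (i - 1) ([] : List Int)) opt1
  PySem.List.pyGetD opt2 (n : Int) []

-- ===== PORT B =====
-- cost(i, j) with the memo dict threaded through (Python closes over `memo`);
-- termination: every recursive call strictly decreases i + j.
def pvGo (s1 s2 : List Char) (alpha : List (String × Int)) (delta : Int) :
    Nat → Nat → PySem.Dict (Nat × Nat) Int → Int × PySem.Dict (Nat × Nat) Int
  | i, j, memo =>
    match memo.get? (i, j) with
    | some v => (v, memo)
    | none =>
      match i, j with
      | 0, j => (delta * (j : Int), memo.insert (0, j) (delta * (j : Int)))
      | i+1, 0 => (delta * ((i : Int) + 1), memo.insert (i+1, 0) (delta * ((i : Int) + 1)))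
      | i+1, j+1 =>
        let r1 := pvGo s1 s2 alpha delta i (j+1) memo
        let r2 := pvGo s1 s2 alpha delta i j r1.2
        let r3 := pvGo s1 s2 alpha delta (i+1) j r2.2
        let v := min (min (r1.1 + delta)
                          (r2.1 + pvLook alpha (String.ofList [s1.getD i ' ', s2.getD j ' '])))
                     (r3.1 + delta)
        (v, r3.2.insert (i+1, j+1) v)
  termination_by i j _ => i + j

def fwdPass_alt (str1 : String) (str2 : String) (alpha : List (String × Int)) (delta : Int) : List Int :=
  let s1 := str1.toList
  let s2 := str2.toList
  let n := s1.length
  let m := s2.length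
  -- return [cost(n, j) for j in range(m+1)], sharing the memo across calls
  ((PySem.List.pyRange 0 ((m : Int) + 1) 1).foldl
    (fun (st : List Int × PySem.Dict (Nat × Nat) Int) j =>
      let r := pvGo s1 s2 alpha delta n j.toNat st.2
      (st.1 ++ [r.1], r.2))
    ([], PySem.Dict.empty)).1

-- ===== PRECONDITION & SPEC =====
-- Pre_ excludes exactly the inputs where A raises KeyError: some needed two-char key absent from alpha.
def Pre_fwdPass (str1 : String) (str2 : String) (alpha : List (String × Int)) (delta : Int) : Prop :=
  (str1.toList.all fun c1 => str2.toList.all fun c2 =>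
    alpha.any fun p => p.1.toList == [c1, c2]) = true
instance (str1 : String) (str2 : String) (alpha : List (String × Int)) (delta : Int) : Decidable (Pre_fwdPass str1 str2 alpha delta) := by
  unfold Pre_fwdPass; infer_instance
def pvWitness_fwdPass : String × String × (List (String × Int)) × Int := ("a", "b", [("ab", 3)], 2)

def Spec_fwdPass (str1 : String) (str2 : String) (alpha : List (String × Int)) (delta : Int) (out : List Int) : Prop := out = fwdPass_alt str1 str2 alpha delta
instance (str1 : String) (str2 : String) (alpha : List (String × Int)) (delta : Int) (out : List Int) : Decidable (Spec_fwdPass str1 str2 alpha delta out) := by unfold Spec_fwdPass; infer_instance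

-- ===== CLAIM (what is proved, stated in full; the proofs are below) =====
def Claim_equal_fwdPass : Prop := ∀ (str1 : String) (str2 : String) (alpha : List (String × Int)) (delta : Int), Dom_fwdPass str1 str2 alpha delta → Pre_fwdPass str1 str2 alpha delta → Spec_fwdPass str1 str2 alpha delta (fwdPass str1 str2 alpha delta)

-- ===== LEMMAS AND PROOFS =====

-- The mathematical alignment table both programs compute.
def pvCell (s1 s2 : List Char) (alpha : List (String × Int)) (delta : Int) : Nat → Nat → Int
  | 0, j => delta * (j : Int)
  | i+1, 0 => delta * ((i : Int) + 1)
  | i+1, j+1 =>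
      min (min (pvCell s1 s2 alpha delta i (j+1) + delta)
               (pvCell s1 s2 alpha delta i j +
                 pvLook alpha (String.ofList [s1.getD i ' ', s2.getD j ' '])))
          (pvCell s1 s2 alpha delta (i+1) j + delta)
  termination_by i j => (i, j)

lemma pvCell_zero_left (s1 s2 : List Char) (alpha : List (String × Int)) (delta : Int) (j : Nat) :
    pvCell s1 s2 alpha delta 0 j = delta * (j : Int) := by simp [pvCell]
lemma pvCell_succ_succ (s1 s2 : List Char) (alpha : List (String × Int)) (delta : Int) (i j : Nat) :
    pvCell s1 s2 alpha delta (i+1) (j+1) =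
      min (min (pvCell s1 s2 alpha delta i (j+1) + delta)
               (pvCell s1 s2 alpha delta i j +
                 pvLook alpha (String.ofList [s1.getD i ' ', s2.getD j ' '])))
          (pvCell s1 s2 alpha delta (i+1) j + delta) := by simp [pvCell]

lemma pvCell_zero_right (s1 s2 : List Char) (alpha : List (String × Int)) (delta : Int) (i : Nat) :
    pvCell s1 s2 alpha delta i 0 = delta * (i : Int) := by
  cases i <;> simp [pvCell]

-- ---------- B-side: memo invariant and correctness of pvGo ----------
def pvInv (s1 s2 : List Char) (alpha : List (String × Int)) (delta : Int)
    (memo : PySem.Dict (Nat × Nat) Int) : Prop :=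
  ∀ p v, memo.get? p = some v → v = pvCell s1 s2 alpha delta p.1 p.2

lemma pvInv_empty (s1 s2 : List Char) (alpha : List (String × Int)) (delta : Int) :
    pvInv s1 s2 alpha delta PySem.Dict.empty := by
  intro p v h; simp [PySem.Dict.get?_empty] at h

lemma pvInv_insert (s1 s2 : List Char) (alpha : List (String × Int)) (delta : Int)
    (memo : PySem.Dict (Nat × Nat) Int) (i j : Nat)
    (hI : pvInv s1 s2 alpha delta memo) :
    pvInv s1 s2 alpha delta (memo.insert (i, j) (pvCell s1 s2 alpha delta i j)) := by
  intro p v h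
  rw [PySem.Dict.get?_insert] at h
  split at h
  · rename_i hp; cases h; rw [hp]
  · exact hI p v h

lemma pvGo_some (s1 s2 : List Char) (alpha : List (String × Int)) (delta : Int)
    (i j : Nat) (memo : PySem.Dict (Nat × Nat) Int) (v : Int)
    (h : memo.get? (i, j) = some v) :
    pvGo s1 s2 alpha delta i j memo = (v, memo) := by
  rw [pvGo.eq_def]
  simp only [h]

lemma pvGo_none_zl (s1 s2 : List Char) (alpha : List (String × Int)) (delta : Int)
    (j : Nat) (memo : PySem.Dict (Nat × Nat) Int)
    (h : memo.get? (0, j) = none) :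
    pvGo s1 s2 alpha delta 0 j memo
      = (delta * (j : Int), memo.insert (0, j) (delta * (j : Int))) := by
  rw [pvGo.eq_def]
  simp only [h]

lemma pvGo_none_zr (s1 s2 : List Char) (alpha : List (String × Int)) (delta : Int)
    (i : Nat) (memo : PySem.Dict (Nat × Nat) Int)
    (h : memo.get? (i+1, 0) = none) :
    pvGo s1 s2 alpha delta (i+1) 0 memo
      = (delta * ((i : Int) + 1), memo.insert (i+1, 0) (delta * ((i : Int) + 1))) := by
  rw [pvGo.eq_def]
  simp only [h]

lemma pvGo_none_ss (s1 s2 : List Char) (alpha : List (String × Int)) (delta : Int)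
    (i j : Nat) (memo : PySem.Dict (Nat × Nat) Int)
    (h : memo.get? (i+1, j+1) = none) :
    pvGo s1 s2 alpha delta (i+1) (j+1) memo
      = (min (min ((pvGo s1 s2 alpha delta i (j+1) memo).1 + delta)
                  ((pvGo s1 s2 alpha delta i j (pvGo s1 s2 alpha delta i (j+1) memo).2).1 +
                    pvLook alpha (String.ofList [s1.getD i ' ', s2.getD j ' '])))
             ((pvGo s1 s2 alpha delta (i+1) j
                (pvGo s1 s2 alpha delta i j (pvGo s1 s2 alpha delta i (j+1) memo).2).2).1 + delta),
         (pvGo s1 s2 alpha delta (i+1) j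
            (pvGo s1 s2 alpha delta i j (pvGo s1 s2 alpha delta i (j+1) memo).2).2).2.insert
           (i+1, j+1)
           (min (min ((pvGo s1 s2 alpha delta i (j+1) memo).1 + delta)
                     ((pvGo s1 s2 alpha delta i j (pvGo s1 s2 alpha delta i (j+1) memo).2).1 +
                       pvLook alpha (String.ofList [s1.getD i ' ', s2.getD j ' '])))
                ((pvGo s1 s2 alpha delta (i+1) j
                   (pvGo s1 s2 alpha delta i j (pvGo s1 s2 alpha delta i (j+1) memo).2).2).1 + delta))) := by
  rw [pvGo.eq_def]
  simp only [h]

lemma pvGo_correct (s1 s2 : List Char) (alpha : List (String × Int)) (delta : Int) :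
    ∀ k i j memo, i + j ≤ k → pvInv s1 s2 alpha delta memo →
      (pvGo s1 s2 alpha delta i j memo).1 = pvCell s1 s2 alpha delta i j ∧
      pvInv s1 s2 alpha delta (pvGo s1 s2 alpha delta i j memo).2 := by
  intro k
  induction k with
  | zero =>
    intro i j memo hk hI
    have hi : i = 0 := by omega
    have hj : j = 0 := by omega
    subst hi; subst hj
    cases hmem : memo.get? (0, 0) with
    | some v => rw [pvGo_some s1 s2 alpha delta 0 0 memo v hmem]; exact ⟨hI (0,0) v hmem, hI⟩
    | none =>
      rw [pvGo_none_zl s1 s2 alpha delta 0 memo hmem]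
      refine ⟨by simp [pvCell_zero_left], ?_⟩
      have := pvInv_insert s1 s2 alpha delta memo 0 0 hI
      simp only [pvCell_zero_left] at this
      simpa using this
  | succ k ih =>
    intro i j memo hk hI
    cases hmem : memo.get? (i, j) with
    | some v => rw [pvGo_some s1 s2 alpha delta i j memo v hmem]; exact ⟨hI (i,j) v hmem, hI⟩
    | none =>
      match i, j with
      | 0, j =>
        rw [pvGo_none_zl s1 s2 alpha delta j memo hmem]
        refine ⟨by simp [pvCell_zero_left], ?_⟩
        have := pvInv_insert s1 s2 alpha delta memo 0 j hI
        simp only [pvCell_zero_left] at this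
        simpa using this
      | i+1, 0 =>
        rw [pvGo_none_zr s1 s2 alpha delta i memo hmem]
        have e : pvCell s1 s2 alpha delta (i+1) 0 = delta * ((i : Int) + 1) := by
          rw [pvCell_zero_right]; push_cast; ring
        refine ⟨by rw [e], ?_⟩
        have := pvInv_insert s1 s2 alpha delta memo (i+1) 0 hI
        rw [e] at this
        simpa using this
      | i+1, j+1 =>
        have h1 := ih i (j+1) memo (by omega) hI
        have h2 := ih i j _ (by omega) h1.2
        have h3 := ih (i+1) j _ (by omega) h2.2
        rw [pvGo_none_ss s1 s2 alpha delta i j memo hmem]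
        rw [h1.1, h2.1, h3.1]
        refine ⟨(pvCell_succ_succ s1 s2 alpha delta i j).symm, ?_⟩
        have := pvInv_insert s1 s2 alpha delta _ (i+1) (j+1) h3.2
        rw [← pvCell_succ_succ]
        simpa using this

-- the list-comprehension fold over range(m+1)
lemma pvB_fold (s1 s2 : List Char) (alpha : List (String × Int)) (delta : Int) (n : Nat) :
    ∀ T (memo : PySem.Dict (Nat × Nat) Int) (out : List Int), pvInv s1 s2 alpha delta memo →
      ((List.range T).foldl
        (fun (st : List Int × PySem.Dict (Nat × Nat) Int) (k : Nat) =>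
          let r := pvGo s1 s2 alpha delta n ((0 + (k : Int)).toNat) st.2
          (st.1 ++ [r.1], r.2))
        (out, memo)).1
      = out ++ (List.range T).map (fun j => pvCell s1 s2 alpha delta n j) ∧
      pvInv s1 s2 alpha delta
        ((List.range T).foldl
          (fun (st : List Int × PySem.Dict (Nat × Nat) Int) (k : Nat) =>
            let r := pvGo s1 s2 alpha delta n ((0 + (k : Int)).toNat) st.2
            (st.1 ++ [r.1], r.2))
          (out, memo)).2 := by
  intro T
  induction T with
  | zero => intro memo out hI; exact ⟨by simp, by simpa using hI⟩
  | succ T ih =>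
    intro memo out hI
    rw [List.range_succ, List.foldl_append, List.foldl_cons, List.foldl_nil]
    have h := ih memo out hI
    set st := (List.range T).foldl
        (fun (st : List Int × PySem.Dict (Nat × Nat) Int) (k : Nat) =>
          let r := pvGo s1 s2 alpha delta n ((0 + (k : Int)).toNat) st.2
          (st.1 ++ [r.1], r.2)) (out, memo) with hst
    have hT : ((0 + (T : Int)).toNat) = T := by omega
    have hg := pvGo_correct s1 s2 alpha delta (n + T) n T st.2 (by omega) h.2
    simp only [hT]
    constructor
    · rw [h.1, hg.1]
      simp
    · exact hg.2
  
lemma pvB_eq (str1 str2 : String) (alpha : List (String × Int)) (delta : Int) :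
    fwdPass_alt str1 str2 alpha delta =
      (List.range (str2.toList.length + 1)).map
        (fun j => pvCell str1.toList str2.toList alpha delta str1.toList.length j) := by
  unfold fwdPass_alt
  simp only []
  rw [PySem.List.pyRange_one]
  rw [show (((str2.toList.length : Int) + 1) - 0).toNat = str2.toList.length + 1 by omega]
  rw [List.foldl_map]
  have := pvB_fold str1.toList str2.toList alpha delta str1.toList.length
    (str2.toList.length + 1) PySem.Dict.empty []
    (pvInv_empty str1.toList str2.toList alpha delta)
  simpa using this.1

-- ---------- A-side lemmas (table simulation) ----------
lemma pv_getD_at {α} (P : List α) (x : α) (S : List α) (d : α) :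
    (P ++ x :: S).getD P.length d = x := by
  induction P with
  | nil => rfl
  | cons a t ih => simpa using ih

lemma pvCell_succ_zero (s1 s2 : List Char) (alpha : List (String × Int)) (delta : Int) (i : Nat) :
    pvCell s1 s2 alpha delta (i+1) 0 = pvCell s1 s2 alpha delta i 0 + delta := by
  rw [pvCell_zero_right, pvCell_zero_right]; push_cast; ring

lemma pv_set_at {α} (P : List α) (x y : α) (S : List α) :
    (P ++ x :: S).set P.length y = P ++ y :: S := by
  induction P with
  | nil => rfl
  | cons a t ih => simpa using ih

lemma pv_getD_mid {α} (K : Nat) (x y : α) (S : List α) (d : α) :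
    (List.replicate K x ++ y :: S).getD K d = y := by
  have := pv_getD_at (List.replicate K x) y S d
  simpa using this

lemma pv_set_mid {α} (K : Nat) (x y z : α) (S : List α) :
    (List.replicate K x ++ y :: S).set K z = List.replicate K x ++ z :: S := by
  have := pv_set_at (List.replicate K x) y z S
  simpa using this

lemma pv_getD_mid2 {α} (K : Nat) (x y z : α) (S : List α) (d : α) :
    (List.replicate K x ++ y :: z :: S).getD (K+1) d = z := by
  have := pv_getD_at (List.replicate K x ++ [y]) z S d
  simpa using this

lemma pv_set_mid2 {α} (K : Nat) (x y z w : α) (S : List α) :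
    (List.replicate K x ++ y :: z :: S).set (K+1) w = List.replicate K x ++ y :: w :: S := by
  have := pv_set_at (List.replicate K x ++ [y]) z w S
  simpa using this

lemma pv_getD_map_left (f : Nat → Int) (T L : Nat) (S : List Int) (hTL : T < L) :
    ((List.range L).map f ++ S).getD T 0 = f T := by
  rw [List.getD_append _ _ _ _ (by simpa using hTL)]
  exact PySem.List.getD_map_range f L T 0 hTL

lemma pv_set_map_left (f : Nat → Int) (T : Nat) (z w : Int) (S : List Int) :
    ((List.range (T+1)).map f ++ z :: S).set (T+1) w = (List.range (T+1)).map f ++ w :: S := by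
  have := pv_set_at ((List.range (T+1)).map f) z w S
  simpa using this

lemma pvA_opt0 (n m : Nat) :
    (PySem.List.pyRange 0 ((n:Int)+1) 1).foldl (fun o (_ : Int) => o ++ [List.replicate (m+1) (0:Int)]) []
    = List.replicate (n+1) (List.replicate (m+1) (0:Int)) := by
  rw [PySem.List.foldl_append_singleton_eq_map]
  simp [PySem.List.length_pyRange_one]

lemma pvA_row0_frame (delta : Int) : ∀ (js : List Int) (r : List Int) (t : List (List Int)),
    js.foldl (fun o j => PySem.List.pySetD o 0
        (PySem.List.pySetD (PySem.List.pyGetD o 0 []) j (delta * j))) (r :: t)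
    = (js.foldl (fun r j => PySem.List.pySetD r j (delta * j)) r) :: t := by
  intro js
  induction js with
  | nil => intro r t; rfl
  | cons j js ih =>
    intro r t
    rw [List.foldl_cons, List.foldl_cons]
    rw [PySem.List.pyGetD_zero_cons]
    rw [show PySem.List.pySetD (r :: t) 0 (PySem.List.pySetD r j (delta * j))
          = PySem.List.pySetD r j (delta * j) :: t by
        simp [PySem.List.pySetD_of_nonneg]]
    exact ih _ t

lemma pvA_setAll (g : Nat → Int) : ∀ (K : Nat) (r : List Int), K ≤ r.length →
    (List.range K).foldl (fun r k => r.set k (g k)) r = (List.range K).map g ++ r.drop K := by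
  intro K
  induction K with
  | zero => intro r _; simp
  | succ K ih =>
    intro r hK
    rw [List.range_succ (n := K), List.foldl_append, List.foldl_cons, List.foldl_nil, ih r (by omega)]
    rw [List.drop_eq_getElem_cons (by omega : K < r.length)]
    rw [show ((List.range K).map g ++ r[K] :: r.drop (K+1)).set K (g K)
          = (List.range K).map g ++ g K :: r.drop (K+1) by
        have := pv_set_at ((List.range K).map g) r[K] (g K) (r.drop (K+1))
        simpa using this]
    simp

lemma pv_pySetD_zero (xs : List Int) (v : Int) : PySem.List.pySetD xs 0 v = xs.set 0 v := by
  simp [PySem.List.pySetD_of_nonneg]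

lemma pv_repl_shift {α} (K : Nat) (x : α) (l : List α) :
    List.replicate K x ++ x :: l = List.replicate (K+1) x ++ l := by
  simp [List.replicate_succ']

lemma pvA_inner (s1 s2 : List Char) (alpha : List (String × Int)) (delta : Int)
    (K : Nat) (rep : List (List Int)) :
    ∀ T, T ≤ s2.length →
    (List.range T).foldl
      (fun o' (t : Nat) =>
        (o'.set (K+1)
          (PySem.List.pySetD (o'.getD (K+1) []) (1 + (t:Int))
            (min (min (PySem.List.pyGetD (o'.getD K []) (1 + (t:Int)) 0 + delta)
                      (PySem.List.pyGetD (o'.getD K []) ((1 + (t:Int)) - 1) 0 +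
                        pvLook alpha (String.ofList [s1.getD K ' ',
                          PySem.List.pyGetD s2 ((1 + (t:Int)) - 1) ' '])))
                 (PySem.List.pyGetD (o'.getD (K+1) []) ((1 + (t:Int)) - 1) 0 + delta)))))
      (List.replicate K ([] : List Int)
        ++ ((List.range (s2.length + 1)).map (fun j => pvCell s1 s2 alpha delta K j))
        :: ((List.range 1).map (fun j => pvCell s1 s2 alpha delta (K+1) j)
              ++ List.replicate s2.length (0:Int)) :: rep)
    = List.replicate K ([] : List Int)
        ++ ((List.range (s2.length + 1)).map (fun j => pvCell s1 s2 alpha delta K j))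
        :: ((List.range (T+1)).map (fun j => pvCell s1 s2 alpha delta (K+1) j)
              ++ List.replicate (s2.length - T) (0:Int)) :: rep := by
  intro T
  induction T with
  | zero => intro _; simp
  | succ T ih =>
    intro hT
    rw [List.range_succ (n := T), List.foldl_append, List.foldl_cons, List.foldl_nil, ih (by omega)]
    have e1 : (1 + (T : Int)) - 1 = ((T : Nat) : Int) := by omega
    have e2 : (1 + (T : Int)) = (((T + 1 : Nat)) : Int) := by push_cast; ring
    rw [e1, e2]
    rw [pv_getD_mid2, pv_getD_mid]
    rw [PySem.List.pyGetD_natCast, PySem.List.pyGetD_natCast, PySem.List.pyGetD_natCast,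
      PySem.List.pyGetD_natCast, PySem.List.pySetD_natCast]
    rw [PySem.List.getD_map_range _ _ _ _ (by omega : T + 1 < s2.length + 1)]
    rw [PySem.List.getD_map_range _ _ _ _ (by omega : T < s2.length + 1)]
    rw [pv_getD_map_left _ _ _ _ (by omega : T < T + 1)]
    rw [show s2.length - T = (s2.length - (T+1)) + 1 by omega, List.replicate_succ]
    rw [pv_set_map_left]
    rw [pv_set_mid2]
    have hv : min (min (pvCell s1 s2 alpha delta K (T+1) + delta)
                       (pvCell s1 s2 alpha delta K T +
                         pvLook alpha (String.ofList [s1.getD K ' ', s2.getD T ' '])))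
                  (pvCell s1 s2 alpha delta (K+1) T + delta)
        = pvCell s1 s2 alpha delta (K+1) (T+1) := (pvCell_succ_succ s1 s2 alpha delta K T).symm
    rw [hv]
    rw [List.range_succ (n := T+1), List.map_append, List.map_cons, List.map_nil]
    simp

lemma pvA_outer (s1 s2 : List Char) (alpha : List (String × Int)) (delta : Int) :
    ∀ K, K ≤ s1.length →
    (List.range K).foldl
      (fun o (k : Nat) =>
        PySem.List.pySetD
          ((PySem.List.pyRange 1 ((s2.length : Int) + 1) 1).foldl
            (fun o' j =>
              PySem.List.pySetD o' (1 + (k:Int))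
                (PySem.List.pySetD (PySem.List.pyGetD o' (1 + (k:Int)) []) j
                  (min (min (PySem.List.pyGetD (PySem.List.pyGetD o' ((1 + (k:Int)) - 1) []) j 0 + delta)
                            (PySem.List.pyGetD (PySem.List.pyGetD o' ((1 + (k:Int)) - 1) []) (j - 1) 0 +
                              pvLook alpha (String.ofList [PySem.List.pyGetD s1 ((1 + (k:Int)) - 1) ' ',
                                PySem.List.pyGetD s2 (j - 1) ' '])))
                       (PySem.List.pyGetD (PySem.List.pyGetD o' (1 + (k:Int)) []) (j - 1) 0 + delta))))
            (PySem.List.pySetD o (1 + (k:Int))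
              (PySem.List.pySetD (PySem.List.pyGetD o (1 + (k:Int)) []) 0
                (PySem.List.pyGetD (PySem.List.pyGetD o ((1 + (k:Int)) - 1) []) 0 0 + delta))))
          ((1 + (k:Int)) - 1) ([] : List Int))
      (((List.range (s2.length + 1)).map (fun j => pvCell s1 s2 alpha delta 0 j))
        :: List.replicate s1.length (List.replicate (s2.length + 1) (0:Int)))
    = List.replicate K ([] : List Int)
        ++ ((List.range (s2.length + 1)).map (fun j => pvCell s1 s2 alpha delta K j))
        :: List.replicate (s1.length - K) (List.replicate (s2.length + 1) (0:Int)) := by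
  intro K
  induction K with
  | zero => intro _; simp
  | succ K ih =>
    intro hK
    rw [List.range_succ (n := K), List.foldl_append, List.foldl_cons, List.foldl_nil, ih (by omega)]
    have e1 : (1 + (K : Int)) - 1 = ((K : Nat) : Int) := by omega
    have e2 : (1 + (K : Int)) = (((K + 1 : Nat)) : Int) := by push_cast; ring
    rw [e1, e2]
    rw [show s1.length - K = (s1.length - (K+1)) + 1 by omega, List.replicate_succ]
    rw [PySem.List.pyRange_one]
    rw [show (((s2.length : Int) + 1) - 1).toNat = s2.length by omega]
    rw [List.foldl_map]
    simp only [PySem.List.pyGetD_natCast, PySem.List.pySetD_natCast, PySem.List.pyGetD_zero,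
      pv_pySetD_zero]
    rw [pv_getD_mid, pv_getD_mid2]
    rw [PySem.List.getD_map_range _ _ _ _ (by omega : 0 < s2.length + 1)]
    rw [List.replicate_succ (n := s2.length) (a := (0:Int))]
    simp only [List.set_cons_zero]
    rw [show pvCell s1 s2 alpha delta K 0 + delta = pvCell s1 s2 alpha delta (K+1) 0 from
      (pvCell_succ_zero s1 s2 alpha delta K).symm]
    rw [show (pvCell s1 s2 alpha delta (K+1) 0) :: List.replicate s2.length (0:Int)
          = (List.range 1).map (fun j => pvCell s1 s2 alpha delta (K+1) j)
              ++ List.replicate s2.length 0 from by simp]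
    rw [pv_set_mid2]
    rw [pvA_inner s1 s2 alpha delta K _ s2.length (le_refl _)]
    simp only [Nat.sub_self, List.replicate_zero, List.append_nil]
    rw [pv_set_mid, pv_repl_shift]

lemma pvA_opt1 (s1 s2 : List Char) (alpha : List (String × Int)) (delta : Int) :
    (PySem.List.pyRange 0 ((s2.length : Int) + 1) 1).foldl
      (fun o j => PySem.List.pySetD o 0
        (PySem.List.pySetD (PySem.List.pyGetD o 0 []) j (delta * j)))
      (List.replicate (s1.length + 1) (List.replicate (s2.length + 1) (0:Int)))
    = ((List.range (s2.length + 1)).map (fun j => pvCell s1 s2 alpha delta 0 j))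
        :: List.replicate s1.length (List.replicate (s2.length + 1) (0:Int)) := by
  rw [List.replicate_succ, pvA_row0_frame]
  congr 1
  rw [PySem.List.pyRange_one]
  rw [show (((s2.length : Int) + 1) - 0).toNat = s2.length + 1 by omega]
  rw [List.foldl_map]
  simp only [zero_add, PySem.List.pySetD_natCast]
  rw [pvA_setAll (fun k => delta * (k:Int)) (s2.length + 1) _ (by simp)]
  simp [pvCell_zero_left, List.drop_of_length_le]

-- A's result equals the last row of the table.
lemma pvA_eq (str1 str2 : String) (alpha : List (String × Int)) (delta : Int) :
    fwdPass str1 str2 alpha delta =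
      (List.range (str2.toList.length + 1)).map
        (fun j => pvCell str1.toList str2.toList alpha delta str1.toList.length j) := by
  unfold fwdPass
  simp only []
  rw [pvA_opt0, pvA_opt1 str1.toList str2.toList alpha delta]
  rw [PySem.List.pyRange_one (a := 1) (b := (str1.toList.length : Int) + 1)]
  rw [show (((str1.toList.length : Int) + 1) - 1).toNat = str1.toList.length by omega]
  rw [List.foldl_map]
  rw [pvA_outer str1.toList str2.toList alpha delta str1.toList.length (le_refl _)]
  rw [Nat.sub_self, List.replicate_zero]
  rw [PySem.List.pyGetD_natCast, pv_getD_mid]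

-- ===== VERDICT (by name: the statement is the Claim_ definition above) =====
theorem fwdPass_spec : Claim_equal_fwdPass := by
  intro str1 str2 alpha delta _hDom _hPre
  unfold Spec_fwdPass
  rw [pvA_eq, pvB_eq]
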